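-- pv_equiv track=rewrite | github.com/KhalidMas23/bananabot | core/solver.py | _peek_first_n_from_counter
-- ===== SOURCE A (Python) =====
-- from collections import Counter
--
-- def _peek_first_n_from_counter(bunch_counter: Counter[str], n: int) -> list[str]:
--     """Deterministic next ``n`` tiles: A..Z order, same rule as ``BunchTracker.peek_next``."""
--     if n <= 0:
--         return []
--     out: list[str] = []
--     for letter in sorted(bunch_counter.keys()):
--         take = min(bunch_counter[letter], n - len(out))
--         out.extend([letter] * take)
--         if len(out) >= n:
--             break
--     return out
-- ===== SOURCE B (Python) =====
-- def _peek_first_n_from_counter(bunch_counter, n):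
--     """B: flatten the counter into a (per-letter n-capped) multiset, sort it once, slice the first n."""
--     if n <= 0:
--         return []
--     capped = [letter for letter, cnt in bunch_counter.items() for _ in range(min(cnt, n))]
--     capped.sort()
--     return capped[:n]
-- ===== Notes on version B (the rewrite author's own statement) =====
-- stated objective: simpler
-- what changed: A's incremental loop over sorted keys with a running length and early break is replaced by flattening the counter into one multiset list (each letter repeated min(count, n) times), sorting it once, and slicing the first n.
import Mathlib
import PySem

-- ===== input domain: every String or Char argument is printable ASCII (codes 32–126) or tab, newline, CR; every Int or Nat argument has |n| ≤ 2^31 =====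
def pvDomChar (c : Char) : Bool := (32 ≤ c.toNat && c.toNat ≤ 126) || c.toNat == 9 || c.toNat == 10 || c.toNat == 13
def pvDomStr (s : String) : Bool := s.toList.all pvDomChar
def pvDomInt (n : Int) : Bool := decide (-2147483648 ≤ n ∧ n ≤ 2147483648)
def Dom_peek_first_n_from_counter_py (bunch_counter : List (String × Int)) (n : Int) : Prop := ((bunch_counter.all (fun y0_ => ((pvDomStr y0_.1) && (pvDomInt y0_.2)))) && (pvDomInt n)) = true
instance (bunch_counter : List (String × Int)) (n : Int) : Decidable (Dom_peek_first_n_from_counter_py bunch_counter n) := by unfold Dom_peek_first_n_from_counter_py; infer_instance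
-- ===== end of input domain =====

-- B replaces A's incremental take-min loop over sorted keys by one sorted flattened multiset
-- (counts capped at n) sliced to its first n elements; objective: simpler.
-- ===== PORT A =====
-- A's 'for letter in sorted(...): take = min(cnt, n - len(out)); out.extend([letter]*take); if len(out) >= n: break'
-- ([letter]*take is [] for take ≤ 0, hence List.replicate take.toNat).
def pvLoopA (d : PySem.Dict String Int) (n : Int) : List String → List String → List String
  | [], out => out
  | letter :: rest, out =>
      let take := min (d.getD letter 0) (n - out.length)
      let out' := out ++ List.replicate take.toNat letter
      if n ≤ out'.length then out' else pvLoopA d n rest out'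

def peek_first_n_from_counter_py (bunch_counter : List (String × Int)) (n : Int) : List String :=
  if n ≤ 0 then []
  else
    let d := PySem.Dict.ofList bunch_counter
    pvLoopA d n (PySem.List.sorted d.keys (fun k => k) false) []

-- ===== PORT B =====
-- Source B: capped = [letter for letter, cnt in items for _ in range(min(cnt, n))]; capped.sort(); capped[:n]
-- (range(m) yields m.toNat items; capped[:n] with 0 < n is take n.toNat).
def peek_first_n_from_counter_py_alt (bunch_counter : List (String × Int)) (n : Int) : List String :=
  if n ≤ 0 then []
  else
    let d := PySem.Dict.ofList bunch_counter
    let capped := d.items.flatMap (fun kv => List.replicate (min kv.2 n).toNat kv.1)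
    (PySem.List.sorted capped (fun x => x) false).take n.toNat

-- ===== PRECONDITION & SPEC =====
def Spec_peek_first_n_from_counter_py (bunch_counter : List (String × Int)) (n : Int) (out : List String) : Prop := out = peek_first_n_from_counter_py_alt bunch_counter n
instance (bunch_counter : List (String × Int)) (n : Int) (out : List String) : Decidable (Spec_peek_first_n_from_counter_py bunch_counter n out) := by unfold Spec_peek_first_n_from_counter_py; infer_instance

-- ===== CLAIM (what is proved, stated in full; the proofs are below) =====
def Claim_equal_peek_first_n_from_counter_py : Prop := ∀ (bunch_counter : List (String × Int)) (n : Int), Dom_peek_first_n_from_counter_py bunch_counter n → Spec_peek_first_n_from_counter_py bunch_counter n (peek_first_n_from_counter_py bunch_counter n)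

-- ===== LEMMAS AND PROOFS =====

-- The multiset B caps and flattens, indexed by a key list with first-match lookup.
def pvFlat (d : PySem.Dict String Int) (n : Int) (ks : List String) : List String :=
  ks.flatMap (fun k => List.replicate (min (d.getD k 0) n).toNat k)

-- B's comprehension over d.items equals pvFlat over d.keys (keys of a Dict are Nodup).
theorem pvFlat_items (d : PySem.Dict String Int) (n : Int) (hnd : d.keys.Nodup) :
    d.items.flatMap (fun kv => List.replicate (min kv.2 n).toNat kv.1) = pvFlat d n d.keys := by
  unfold pvFlat PySem.Dict.keys
  have gen : ∀ l : List (String × Int),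
      (∀ kv ∈ l, List.replicate (min kv.2 n).toNat kv.1
        = List.replicate (min (d.getD kv.1 0) n).toNat kv.1) →
      l.flatMap (fun kv => List.replicate (min kv.2 n).toNat kv.1)
        = (l.map Prod.fst).flatMap (fun k => List.replicate (min (d.getD k 0) n).toNat k) := by
    intro l hl
    induction l with
    | nil => rfl
    | cons a t ih =>
        simp only [List.flatMap_cons, List.map_cons, hl a (by simp)]
        rw [ih (fun kv hk => hl kv (by simp [hk]))]
  exact gen d.items (fun kv hk => by
    rw [PySem.Dict.getD_of_mem_items d (k := kv.1) (v := kv.2) (by simpa using hk) hnd])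

theorem pvFlat_pairwise (d : PySem.Dict String Int) (n : Int) (ks : List String)
    (h : ks.Pairwise (· ≤ ·)) : (pvFlat d n ks).Pairwise (· ≤ ·) := by
  induction ks with
  | nil => simp [pvFlat]
  | cons k t ih =>
      rcases List.pairwise_cons.mp h with ⟨hk, ht⟩
      unfold pvFlat at *
      rw [List.flatMap_cons, List.pairwise_append]
      refine ⟨List.pairwise_replicate.mpr (Or.inr le_rfl), ih ht, ?_⟩
      intro a ha b hb
      rcases List.mem_flatMap.mp hb with ⟨k', hk', hb'⟩
      rw [List.eq_of_mem_replicate ha, List.eq_of_mem_replicate hb']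
      exact hk k' hk'

-- A's loop with remaining budget n - len(out) takes exactly the first (n - len(out)) of pvFlat.
theorem pvLoopA_eq (d : PySem.Dict String Int) (n : Int) (ks : List String) :
    ∀ out : List String, (out.length : Int) < n →
      pvLoopA d n ks out = out ++ (pvFlat d n ks).take (n - out.length).toNat := by
  induction ks with
  | nil => intro out _; simp [pvLoopA, pvFlat]
  | cons k t ih =>
      intro out hout
      simp only [pvLoopA, pvFlat, List.flatMap_cons]
      rw [List.take_append, List.take_replicate]
      simp only [List.length_append, List.length_replicate, List.length_replicate]
      split_ifs with h
      · have h1 : (min (d.getD k 0) (n - ↑out.length)).toNat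
            = min (n - ↑out.length).toNat (min (d.getD k 0) n).toNat := by omega
        have h2 : (n - ↑out.length).toNat - (min (d.getD k 0) n).toNat = 0 := by omega
        rw [h2, List.take_zero, List.append_nil, ← h1]
      · rw [ih (out ++ List.replicate (min (d.getD k 0) (n - ↑out.length)).toNat k)
              (by simp only [List.length_append, List.length_replicate]; omega)]
        have h1 : min (n - ↑out.length).toNat (min (d.getD k 0) n).toNat
            = (min (d.getD k 0) (n - ↑out.length)).toNat := by omega
        have h2 : (n - ↑out.length).toNat - (min (d.getD k 0) n).toNat
            = (n - ↑(out ++ List.replicate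
                (min (d.getD k 0) (n - ↑out.length)).toNat k).length).toNat := by
          simp only [List.length_append, List.length_replicate]; omega
        rw [h1, h2, List.append_assoc]
        rfl

-- ===== VERDICT (by name: the statement is the Claim_ definition above) =====
theorem peek_first_n_from_counter_py_spec : Claim_equal_peek_first_n_from_counter_py := by
  intro bunch_counter n _
  unfold Spec_peek_first_n_from_counter_py
  unfold peek_first_n_from_counter_py peek_first_n_from_counter_py_alt
  by_cases hn : n ≤ 0
  · simp [hn]
  · simp only [if_neg hn]
    set d := PySem.Dict.ofList bunch_counter with hd
    have hnd : d.keys.Nodup := PySem.Dict.nodup_keys_ofList bunch_counter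
    rw [pvFlat_items d n hnd]
    have hsorted : PySem.List.sorted (pvFlat d n d.keys) (fun x => x) false
        = pvFlat d n (PySem.List.sorted d.keys (fun k => k) false) := by
      apply PySem.List.sorted_id_eq_of_perm_of_pairwise
      · exact List.Perm.flatMap_right _ (PySem.List.sorted_perm d.keys (fun k => k) false)
      · exact pvFlat_pairwise d n _
          (by simpa using PySem.List.sorted_pairwise d.keys (fun k => k))
    rw [hsorted, pvLoopA_eq d n _ [] (by simp; omega)]
    simp
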